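-- pv_equiv track=rewrite | github.com/Jfrequelin/VocalAssist | scripts/sync_tickets.py | _classify_issue_kind
-- ===== SOURCE A (Python) =====
-- from typing import Optional, List, Dict, Any, TypedDict, cast
--
-- IssueData = Dict[str, Any]
--
-- def _classify_issue_kind(issue: IssueData) -> str:
--     label_names = {str(label.get("name", "")) for label in issue.get("labels", [])}
--     if "macro" in label_names:
--         return "macro"
--     if "task" in label_names:
--         return "task"
--     if "subticket" in label_names:
--         return "subticket"
--     if "atomic-task" in label_names:
--         return "atomic-task"
--     return "other"
-- ===== SOURCE B (Python) =====
-- def _classify_issue_kind(issue):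
--     rank = {"macro": 0, "task": 1, "subticket": 2, "atomic-task": 3}
--     kinds = ["macro", "task", "subticket", "atomic-task"]
--     best = None
--     for label in issue.get("labels", []):
--         r = rank.get(str(label.get("name", "")))
--         if r is not None and (best is None or r < best):
--             best = r
--     return "other" if best is None else kinds[best]
-- ===== Notes on version B (the rewrite author's own statement) =====
-- stated objective: alternative
-- what changed: Replaces the set-of-names construction plus an ordered chain of membership tests with a single pass over the labels that keeps the minimum priority rank seen, indexing a kinds table at the end.
import Mathlib
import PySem

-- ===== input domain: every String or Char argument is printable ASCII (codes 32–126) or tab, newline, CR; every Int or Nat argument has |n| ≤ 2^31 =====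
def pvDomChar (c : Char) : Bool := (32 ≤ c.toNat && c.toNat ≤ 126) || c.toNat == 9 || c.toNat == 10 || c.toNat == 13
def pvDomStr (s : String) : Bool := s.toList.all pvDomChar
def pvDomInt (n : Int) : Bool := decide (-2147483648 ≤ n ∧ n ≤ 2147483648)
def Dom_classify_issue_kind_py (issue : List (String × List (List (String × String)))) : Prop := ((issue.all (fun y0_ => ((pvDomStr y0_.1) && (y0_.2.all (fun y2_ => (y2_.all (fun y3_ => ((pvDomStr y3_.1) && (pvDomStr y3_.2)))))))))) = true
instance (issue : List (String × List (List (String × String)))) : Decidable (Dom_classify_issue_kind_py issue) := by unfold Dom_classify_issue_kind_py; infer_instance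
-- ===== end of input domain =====

-- B replaces A's set-of-names plus ordered membership chain with a single min-rank scan over the labels (alternative decomposition, same cost).

-- ===== PORT A =====
def classify_issue_kind_py (issue : List (String × List (List (String × String)))) : String :=
  let label_names : PySem.Set String :=
    PySem.Set.ofList (((PySem.Dict.mk issue).getD "labels" []).map
      (fun label => (PySem.Dict.mk label).getD "name" ""))
  if PySem.Set.contains label_names "macro" then "macro"
  else if PySem.Set.contains label_names "task" then "task"
  else if PySem.Set.contains label_names "subticket" then "subticket"
  else if PySem.Set.contains label_names "atomic-task" then "atomic-task"
  else "other"

-- ===== PORT B =====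
def classify_issue_kind_py_alt (issue : List (String × List (List (String × String)))) : String :=
  let rank : PySem.Dict String Int :=
    PySem.Dict.mk [("macro", 0), ("task", 1), ("subticket", 2), ("atomic-task", 3)]
  let kinds : List String := ["macro", "task", "subticket", "atomic-task"]
  let best : Option Int :=
    ((PySem.Dict.mk issue).getD "labels" []).foldl
      (fun best label =>
        match rank.get? ((PySem.Dict.mk label).getD "name" "") with
        | none => best
        | some r =>
          match best with
          | none => some r
          | some b => if r < b then some r else best)
      none
  match best with
  | none => "other"
  | some b => PySem.List.pyGetD kinds b "other"   -- kinds[best]; best ∈ {0,1,2,3}, always in range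

-- ===== PRECONDITION & SPEC =====
def Spec_classify_issue_kind_py (issue : List (String × List (List (String × String)))) (out : String) : Prop := out = classify_issue_kind_py_alt issue
instance (issue : List (String × List (List (String × String)))) (out : String) : Decidable (Spec_classify_issue_kind_py issue out) := by unfold Spec_classify_issue_kind_py; infer_instance

-- ===== CLAIM (what is proved, stated in full; the proofs are below) =====
def Claim_equal_classify_issue_kind_py : Prop := ∀ (issue : List (String × List (List (String × String)))), Dom_classify_issue_kind_py issue → Spec_classify_issue_kind_py issue (classify_issue_kind_py issue)

-- ===== LEMMAS AND PROOFS =====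

-- option-min of two ranks
def pvOmin (a b : Option Int) : Option Int :=
  match a, b with
  | none, b => b
  | a, none => a
  | some x, some y => some (min x y)

def pvRank : PySem.Dict String Int :=
  PySem.Dict.mk [("macro", 0), ("task", 1), ("subticket", 2), ("atomic-task", 3)]

-- the minimum rank present in a list of names, characterized by memberships
def pvSpecMin (names : List String) : Option Int :=
  if "macro" ∈ names then some 0
  else if "task" ∈ names then some 1
  else if "subticket" ∈ names then some 2
  else if "atomic-task" ∈ names then some 3
  else none

lemma pvOmin_none_right (a : Option Int) : pvOmin a none = a := by
  cases a <;> rfl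

lemma pvOmin_assoc (a b c : Option Int) : pvOmin (pvOmin a b) c = pvOmin a (pvOmin b c) := by
  cases a <;> cases b <;> cases c <;> simp [pvOmin, min_assoc]

lemma pvStep_eq (acc : Option Int) (n : String) :
    (match pvRank.get? n with
     | none => acc
     | some r =>
       match acc with
       | none => some r
       | some b => if r < b then some r else acc) = pvOmin acc (pvRank.get? n) := by
  cases h : pvRank.get? n with
  | none => cases acc <;> simp [pvOmin]
  | some r =>
    cases acc with
    | none => simp [pvOmin]
    | some b =>
      simp only [pvOmin]
      split_ifs with hlt
      · simp [le_of_lt hlt]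
      · simp
        omega

lemma pvSpecMin_cons (n : String) (ns : List String) :
    pvSpecMin (n :: ns) = pvOmin (pvRank.get? n) (pvSpecMin ns) := by
  by_cases h0 : n = "macro"
  · subst h0
    rw [show pvRank.get? "macro" = some 0 from by decide]
    simp only [pvSpecMin, List.mem_cons, true_or, if_true]
    split_ifs <;> simp [pvOmin]
  by_cases h1 : n = "task"
  · subst h1
    rw [show pvRank.get? "task" = some 1 from by decide]
    by_cases hm : "macro" ∈ ns <;> simp [pvSpecMin, hm, pvOmin] <;> split_ifs <;> simp
  by_cases h2 : n = "subticket"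
  · subst h2
    rw [show pvRank.get? "subticket" = some 2 from by decide]
    by_cases hm : "macro" ∈ ns <;> by_cases ht : "task" ∈ ns <;>
      simp [pvSpecMin, hm, ht, pvOmin] <;> split_ifs <;> simp
  by_cases h3 : n = "atomic-task"
  · subst h3
    rw [show pvRank.get? "atomic-task" = some 3 from by decide]
    by_cases hm : "macro" ∈ ns <;> by_cases ht : "task" ∈ ns <;> by_cases hs : "subticket" ∈ ns <;>
      simp [pvSpecMin, hm, ht, hs, pvOmin] <;> split_ifs <;> simp
  · have hr : pvRank.get? n = none := by
      simp [pvRank, Ne.symm h0, Ne.symm h1, Ne.symm h2, Ne.symm h3, PySem.Dict.get?]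
    rw [hr]
    simp only [pvSpecMin, List.mem_cons, Ne.symm h0, Ne.symm h1, Ne.symm h2, Ne.symm h3,
      false_or, pvOmin]

def pvName (label : List (String × String)) : String := (PySem.Dict.mk label).getD "name" ""

lemma pvFold_eq (labels : List (List (String × String))) (acc : Option Int) :
    labels.foldl
      (fun best label =>
        match pvRank.get? ((PySem.Dict.mk label).getD "name" "") with
        | none => best
        | some r =>
          match best with
          | none => some r
          | some b => if r < b then some r else best)
      acc = pvOmin acc (pvSpecMin (labels.map pvName)) := by
  induction labels generalizing acc with
  | nil => simp [pvSpecMin, pvOmin_none_right]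
  | cons l ls ih =>
    simp only [List.foldl_cons, List.map_cons]
    rw [pvStep_eq, ih, pvSpecMin_cons, ← pvOmin_assoc]
    rfl

-- ===== VERDICT (by name: the statement is the Claim_ definition above) =====
theorem classify_issue_kind_py_spec : Claim_equal_classify_issue_kind_py := by
  intro issue _
  unfold Spec_classify_issue_kind_py classify_issue_kind_py classify_issue_kind_py_alt
  simp only []
  rw [show (PySem.Dict.mk [("macro", (0:Int)), ("task", 1), ("subticket", 2), ("atomic-task", 3)]) = pvRank from rfl]
  rw [pvFold_eq,
    show (fun label : List (String × String) => (PySem.Dict.mk label).getD "name" "") = pvName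
      from rfl]
  set names := ((PySem.Dict.mk issue).getD "labels" []).map pvName with hnames
  by_cases h0 : "macro" ∈ names
  · simp [pvSpecMin, h0, pvOmin]
  by_cases h1 : "task" ∈ names
  · simp [pvSpecMin, h0, h1, pvOmin]
    decide
  by_cases h2 : "subticket" ∈ names
  · simp [pvSpecMin, h0, h1, h2, pvOmin]
    decide
  by_cases h3 : "atomic-task" ∈ names
  · simp [pvSpecMin, h0, h1, h2, h3, pvOmin]
    decide
  · simp [pvSpecMin, h0, h1, h2, h3, pvOmin]
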